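-- pv_equiv track=rewrite | github.com/empty-block/vibe-playlist | data/pipelines/metadata_extractor/lib/metadata_extractor.py | extract_rodeo_metadata
-- ===== SOURCE A (Python) =====
-- from typing import Dict, List, Optional, Any
--
-- def extract_rodeo_metadata(metadata: Dict) -> str:
--     """Extract key Rodeo metadata into clean format"""
--     try:
--         # Get title from Open Graph (already clean, no suffix removal needed)
--         title = None
--         if 'opengraph' in metadata:
--             for og_section in metadata['opengraph']:
--                 for prop in og_section.get('properties', []):
--                     if prop[0] == 'og:title':
--                         title = prop[1]
--                         break
--
--         # Get description from Open Graph
--         description = None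
--         if 'opengraph' in metadata:
--             for og_section in metadata['opengraph']:
--                 for prop in og_section.get('properties', []):
--                     if prop[0] == 'og:description':
--                         desc = prop[1]
--                         if desc:
--                             # Truncate long descriptions for readability
--                             if len(desc) > 200:
--                                 description = desc[:200] + "..."
--                             else:
--                                 description = desc
--                         break
--
--         # Get image
--         image = None
--         if 'opengraph' in metadata:
--             for og_section in metadata['opengraph']:
--                 for prop in og_section.get('properties', []):
--                     if prop[0] == 'og:image':
--                         image = prop[1]
--                         break
--
--         # Build formatted string
--         parts = []
--         if title:
--             parts.append(f"title - {title}")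
--         if description:
--             parts.append(f"description - {description}")
--         if image:
--             parts.append(f"image - {image}")
--
--         return " | ".join(parts) if parts else "rodeo - metadata extracted"
--
--     except Exception as e:
--         return f"rodeo - extraction error: {str(e)}"
-- ===== SOURCE B (Python) =====
-- def extract_rodeo_metadata(metadata):
--     """Extract key Rodeo metadata into clean format (single pass over sections)"""
--     try:
--         title = description = image = None
--         for og_section in metadata.get('opengraph', []):
--             t = d = i = None
--             for prop in og_section.get('properties', []):
--                 if t is not None and d is not None and i is not None:
--                     break
--                 key = prop[0]
--                 if t is None and key == 'og:title':
--                     t = prop[1]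
--                 elif d is None and key == 'og:description':
--                     d = prop[1]
--                 elif i is None and key == 'og:image':
--                     i = prop[1]
--             if t is not None:
--                 title = t
--             if d:
--                 description = d[:200] + "..." if len(d) > 200 else d
--             if i is not None:
--                 image = i
--
--         parts = []
--         if title:
--             parts.append(f"title - {title}")
--         if description:
--             parts.append(f"description - {description}")
--         if image:
--             parts.append(f"image - {image}")
--
--         return " | ".join(parts) if parts else "rodeo - metadata extracted"
--
--     except Exception as e:
--         return f"rodeo - extraction error: {str(e)}"
-- ===== Notes on version B (the rewrite author's own statement) =====
-- stated objective: alternative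
-- what changed: A scans the opengraph sections three separate times (one full pass each for og:title, og:description, og:image); B makes a single pass over the sections, scanning each section's properties once to pick up the first occurrence of all three keys together (stopping once all are found) and merging them into the running state, preserving A's first-prop-per-section / last-section-wins semantics and its caught-IndexError error string.
import Mathlib
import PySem

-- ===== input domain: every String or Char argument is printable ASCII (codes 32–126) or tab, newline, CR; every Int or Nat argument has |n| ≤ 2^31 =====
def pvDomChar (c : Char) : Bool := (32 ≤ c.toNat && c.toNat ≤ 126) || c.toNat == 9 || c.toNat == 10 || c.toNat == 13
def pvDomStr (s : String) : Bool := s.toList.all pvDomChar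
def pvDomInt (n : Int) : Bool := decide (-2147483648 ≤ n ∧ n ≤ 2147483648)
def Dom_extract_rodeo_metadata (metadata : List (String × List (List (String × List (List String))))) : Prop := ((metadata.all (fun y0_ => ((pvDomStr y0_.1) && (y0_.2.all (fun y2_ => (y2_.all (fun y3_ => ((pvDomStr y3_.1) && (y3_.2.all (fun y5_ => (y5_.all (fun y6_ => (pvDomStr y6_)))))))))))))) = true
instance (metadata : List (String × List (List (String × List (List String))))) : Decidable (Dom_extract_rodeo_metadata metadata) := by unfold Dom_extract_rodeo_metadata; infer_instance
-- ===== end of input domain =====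

-- B replaces A's three independent full scans of the opengraph sections by ONE pass that finds the
-- first og:title / og:description / og:image of each section together (objective: alternative, same cost class).
-- Python's list indexing prop[0]/prop[1] can raise IndexError, which A CATCHES and turns into the
-- string "rodeo - extraction error: list index out of range"; both ports model that raise as
-- Except.error () and return that same string, so A is total and no Pre_ is needed.

-- ===== PORT A =====
-- og_section.get('properties', [])
def pvProps (s : List (String × List (List String))) : List (List String) :=
  (PySem.Dict.mk s).getD "properties" []

-- len(desc) > 200 ? desc[:200] + "..." : desc
def pvTrunc (v : String) : String :=
  if PySem.Str.len v > 200 then PySem.Str.slice v none (some 200) ++ "..." else v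

-- one inner loop of A ('for prop in og_section.get(...):  if prop[0] == key: … break'):
-- returns the first value whose prop[0] == key (reading prop[1] there), none if no match,
-- .error () where Python raises IndexError on prop[0]/prop[1]
def pvScanProps (key : String) : List (List String) → Except Unit (Option String)
  | [] => .ok none
  | p :: rest =>
    match PySem.List.pyGet? p 0 with
    | none => .error ()
    | some k =>
      if k == key then
        match PySem.List.pyGet? p 1 with
        | none => .error ()
        | some v => .ok (some v)
      else pvScanProps key rest

-- A's title pass over the sections (break leaves the inner loop only; a later section overrides)
def pvTitlePass : List (List (String × List (List String))) → Option String → Except Unit (Option String)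
  | [], st => .ok st
  | s :: rest, st =>
    match pvScanProps "og:title" (pvProps s) with
    | .error () => .error ()
    | .ok none => pvTitlePass rest st
    | .ok (some v) => pvTitlePass rest (some v)

-- A's description pass: on a match the state changes only when desc is truthy (non-empty)
def pvDescPass : List (List (String × List (List String))) → Option String → Except Unit (Option String)
  | [], st => .ok st
  | s :: rest, st =>
    match pvScanProps "og:description" (pvProps s) with
    | .error () => .error ()
    | .ok none => pvDescPass rest st
    | .ok (some v) => pvDescPass rest (if v = "" then st else some (pvTrunc v))

-- A's image pass
def pvImagePass : List (List (String × List (List String))) → Option String → Except Unit (Option String)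
  | [], st => .ok st
  | s :: rest, st =>
    match pvScanProps "og:image" (pvProps s) with
    | .error () => .error ()
    | .ok none => pvImagePass rest st
    | .ok (some v) => pvImagePass rest (some v)

-- the shared tail of both Pythons: build parts and join (falsy = empty string is skipped)
def pvAssemble (title description image : Option String) : String :=
  let parts : List String := []
  let parts := match title with
    | some t => if t = "" then parts else parts ++ ["title - " ++ t]
    | none => parts
  let parts := match description with
    | some d => if d = "" then parts else parts ++ ["description - " ++ d]
    | none => parts
  let parts := match image with
    | some i => if i = "" then parts else parts ++ ["image - " ++ i]
    | none => parts
  if parts = [] then "rodeo - metadata extracted" else PySem.Str.join " | " parts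

def extract_rodeo_metadata (metadata : List (String × List (List (String × List (List String))))) : String :=
  let md := PySem.Dict.mk metadata
  -- each "if 'opengraph' in metadata: for og_section in metadata['opengraph']: …" block
  let tR := match md.get? "opengraph" with
    | some secs => pvTitlePass secs none
    | none => .ok none
  let dR := match md.get? "opengraph" with
    | some secs => pvDescPass secs none
    | none => .ok none
  let iR := match md.get? "opengraph" with
    | some secs => pvImagePass secs none
    | none => .ok none
  match tR, dR, iR with
  | .ok title, .ok description, .ok image => pvAssemble title description image
  | _, _, _ => "rodeo - extraction error: list index out of range"

-- ===== PORT B =====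
-- B's single inner loop: find the first og:title / og:description / og:image of one section
-- in one scan, stopping once all three are found; .error () where Python raises IndexError
def pvScanAll : List (List String) → Option String → Option String → Option String →
    Except Unit (Option String × Option String × Option String)
  | [], t, d, i => .ok (t, d, i)
  | p :: rest, t, d, i =>
    if t.isSome && d.isSome && i.isSome then .ok (t, d, i)
    else
      match PySem.List.pyGet? p 0 with
      | none => .error ()
      | some k =>
        if t.isNone && k == "og:title" then
          match PySem.List.pyGet? p 1 with
          | none => .error ()
          | some v => pvScanAll rest (some v) d i
        else if d.isNone && k == "og:description" then
          match PySem.List.pyGet? p 1 with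
          | none => .error ()
          | some v => pvScanAll rest t (some v) i
        else if i.isNone && k == "og:image" then
          match PySem.List.pyGet? p 1 with
          | none => .error ()
          | some v => pvScanAll rest t d (some v)
        else pvScanAll rest t d i

-- B's single outer loop: merge each section's three findings into the running state
def pvSecFold : List (List (String × List (List String))) →
    Option String × Option String × Option String →
    Except Unit (Option String × Option String × Option String)
  | [], st => .ok st
  | s :: rest, (title, description, image) =>
    match pvScanAll (pvProps s) none none none with
    | .error () => .error ()
    | .ok (t, d, i) =>
      let title := match t with | some v => some v | none => title
      let description := match d with
        | some v => if v = "" then description else some (pvTrunc v)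
        | none => description
      let image := match i with | some v => some v | none => image
      pvSecFold rest (title, description, image)

def extract_rodeo_metadata_alt (metadata : List (String × List (List (String × List (List String))))) : String :=
  -- metadata.get('opengraph', [])
  match pvSecFold ((PySem.Dict.mk metadata).getD "opengraph" []) (none, none, none) with
  | .ok (title, description, image) => pvAssemble title description image
  | .error () => "rodeo - extraction error: list index out of range"

-- ===== PRECONDITION & SPEC =====
def Spec_extract_rodeo_metadata (metadata : List (String × List (List (String × List (List String))))) (out : String) : Prop := out = extract_rodeo_metadata_alt metadata
instance (metadata : List (String × List (List (String × List (List String))))) (out : String) : Decidable (Spec_extract_rodeo_metadata metadata out) := by unfold Spec_extract_rodeo_metadata; infer_instance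

-- ===== CLAIM (what is proved, stated in full; the proofs are below) =====
def Claim_equal_extract_rodeo_metadata : Prop := ∀ (metadata : List (String × List (List (String × List (List String))))), Dom_extract_rodeo_metadata metadata → Spec_extract_rodeo_metadata metadata (extract_rodeo_metadata metadata)

-- ===== LEMMAS AND PROOFS =====

-- "resume" one of A's inner scans given what is already found
def pvResume (key : String) (st : Option String) (props : List (List String)) :
    Except Unit (Option String) :=
  match st with
  | some v => .ok (some v)
  | none => pvScanProps key props

-- combine three scan results, error if any errors (the IndexError message is the same everywhere)
def pvCombine (a b c : Except Unit (Option String)) :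
    Except Unit (Option String × Option String × Option String) :=
  match a, b, c with
  | .ok x, .ok y, .ok z => .ok (x, y, z)
  | _, _, _ => .error ()

-- core: B's single scan of a section computes exactly the triple of A's three scans
theorem pvCombine_err1 (b c : Except Unit (Option String)) :
    pvCombine (.error ()) b c = .error () := by cases b <;> cases c <;> rfl

theorem pvCombine_err2 (a c : Except Unit (Option String)) :
    pvCombine a (.error ()) c = .error () := by cases a <;> cases c <;> rfl

theorem pvCombine_err3 (a b : Except Unit (Option String)) :
    pvCombine a b (.error ()) = .error () := by cases a <;> cases b <;> rfl

theorem pvCombine_ok (x y z : Option String) :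
    pvCombine (.ok x) (.ok y) (.ok z) = .ok (x, y, z) := rfl

theorem scanAll_eq (props : List (List String)) (t d i : Option String) :
    pvScanAll props t d i =
      pvCombine (pvResume "og:title" t props) (pvResume "og:description" d props)
        (pvResume "og:image" i props) := by
  induction props generalizing t d i with
  | nil =>
    cases t <;> cases d <;> cases i <;> rfl
  | cons p rest ih =>
    cases hk : PySem.List.pyGet? p 0 with
    | none =>
      cases t <;> cases d <;> cases i <;>
        simp [pvScanAll, pvScanProps, pvResume, hk,
          pvCombine_err1, pvCombine_err2, pvCombine_err3, pvCombine_ok]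
    | some k =>
      cases hT : k == "og:title" with
      | true =>
        have hkT := eq_of_beq hT; subst hkT
        cases hv : PySem.List.pyGet? p 1 <;> cases t <;> cases d <;> cases i <;>
          simp [pvScanAll, pvScanProps, pvResume, hk, hv, ih,
            pvCombine_err1, pvCombine_err2, pvCombine_err3, pvCombine_ok]
      | false =>
        cases hD : k == "og:description" with
        | true =>
          have hkD := eq_of_beq hD; subst hkD
          cases hv : PySem.List.pyGet? p 1 <;> cases t <;> cases d <;> cases i <;>
            simp [pvScanAll, pvScanProps, pvResume, hk, hv, ih,
              pvCombine_err1, pvCombine_err2, pvCombine_err3, pvCombine_ok]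
        | false =>
          cases hI : k == "og:image" with
          | true =>
            have hkI := eq_of_beq hI; subst hkI
            cases hv : PySem.List.pyGet? p 1 <;> cases t <;> cases d <;> cases i <;>
              simp [pvScanAll, pvScanProps, pvResume, hk, hv, hT, hD, ih,
                pvCombine_err1, pvCombine_err2, pvCombine_err3, pvCombine_ok]
          | false =>
            cases t <;> cases d <;> cases i <;>
              simp [pvScanAll, pvScanProps, pvResume, hk, hT, hD, hI, ih,
                pvCombine_err1, pvCombine_err2, pvCombine_err3, pvCombine_ok]

-- B's outer loop computes the triple of A's three passes
theorem secFold_eq (secs : List (List (String × List (List String)))) (t d i : Option String) :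
    pvSecFold secs (t, d, i) =
      pvCombine (pvTitlePass secs t) (pvDescPass secs d) (pvImagePass secs i) := by
  induction secs generalizing t d i with
  | nil => simp [pvSecFold, pvTitlePass, pvDescPass, pvImagePass, pvCombine]
  | cons s rest ih =>
    have h := scanAll_eq (pvProps s) none none none
    simp only [pvSecFold, pvTitlePass, pvDescPass, pvImagePass, h, pvResume]
    cases pvScanProps "og:title" (pvProps s) with
    | error e => cases e; simp [pvCombine]
    | ok ot =>
      cases pvScanProps "og:description" (pvProps s) with
      | error e => cases e; simp [pvCombine]
      | ok od =>
        cases pvScanProps "og:image" (pvProps s) with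
        | error e => cases e; simp [pvCombine]
        | ok oi =>
          cases ot <;> cases od <;> cases oi <;> simp [pvCombine, ih]

-- ===== VERDICT (by name: the statement is the Claim_ definition above) =====
theorem extract_rodeo_metadata_spec : Claim_equal_extract_rodeo_metadata := by
  intro metadata _
  unfold Spec_extract_rodeo_metadata extract_rodeo_metadata extract_rodeo_metadata_alt
  cases hmd : (PySem.Dict.mk metadata).get? "opengraph" with
  | none =>
    simp [PySem.Dict.getD, hmd, pvSecFold]
  | some secs =>
    simp only [PySem.Dict.getD, hmd, Option.getD, secFold_eq]
    cases pvTitlePass secs none with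
    | error e => cases e; cases pvDescPass secs none <;> cases pvImagePass secs none <;>
        simp [pvCombine]
    | ok ot =>
      cases pvDescPass secs none with
      | error e => cases e; cases pvImagePass secs none <;> simp [pvCombine]
      | ok od =>
        cases pvImagePass secs none with
        | error e => cases e; simp [pvCombine]
        | ok oi => simp [pvCombine]
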